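-- pv_equiv track=rewrite | github.com/phalpern/AdventOfCode | 2021/puzzle3.2.py | partitionPass
-- ===== SOURCE A (Python) =====
-- def partitionPass(data, pos, keepMost):
--     zeros = [ ]
--     ones  = [ ]
--     for str in data:
--         if len(str) == 0:
--             pass
--         elif str[pos] == '0':
--             zeros.append(str)
--         else:
--             ones.append(str)
--
--     if keepMost:
--         if len(zeros) > len(ones):
--             return zeros
--         else:
--             return ones
--     else:
--         if len(zeros) > len(ones):
--             return ones
--         else:
--             return zeros
-- ===== SOURCE B (Python) =====
-- def partitionPass(data, pos, keepMost):
--     cz = co = 0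
--     for s in data:
--         if len(s) != 0:
--             if s[pos] == '0':
--                 cz += 1
--             else:
--                 co += 1
--     keepZeros = (cz > co) == keepMost
--     return [s for s in data if len(s) != 0 and (s[pos] == '0') == keepZeros]
-- ===== Notes on version B (the rewrite author's own statement) =====
-- stated objective: alternative
-- what changed: B maintains two integer counters instead of two materialized lists and produces the result with a separate filtering pass over the input, instead of returning one of the accumulated lists.
import Mathlib
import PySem

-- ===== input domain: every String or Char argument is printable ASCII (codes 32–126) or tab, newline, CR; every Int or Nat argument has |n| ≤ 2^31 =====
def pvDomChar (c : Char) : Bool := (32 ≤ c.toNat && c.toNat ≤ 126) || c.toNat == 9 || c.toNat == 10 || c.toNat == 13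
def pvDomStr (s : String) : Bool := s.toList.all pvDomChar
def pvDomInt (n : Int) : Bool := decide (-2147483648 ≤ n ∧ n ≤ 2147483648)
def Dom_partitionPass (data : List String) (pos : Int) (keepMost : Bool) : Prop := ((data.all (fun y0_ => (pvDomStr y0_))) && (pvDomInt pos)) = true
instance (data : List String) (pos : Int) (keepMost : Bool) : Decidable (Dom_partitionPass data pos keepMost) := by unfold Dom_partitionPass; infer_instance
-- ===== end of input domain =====

-- B replaces A's two accumulated lists by two counters plus a separate filtering pass (alternative decomposition, same cost).

-- ===== PORT A =====
-- A: one loop appending each non-empty string to `zeros` or `ones`, then return one of the two lists.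
def partitionPass (data : List String) (pos : Int) (keepMost : Bool) : List String :=
  let p := data.foldl (fun (acc : List String × List String) s =>
      if s.toList.length = 0 then acc
      else if PySem.Str.pyGet? s pos == some '0' then (acc.1 ++ [s], acc.2)
      else (acc.1, acc.2 ++ [s])) ([], [])
  if keepMost then
    if p.1.length > p.2.length then p.1 else p.2
  else
    if p.1.length > p.2.length then p.2 else p.1

-- ===== PORT B =====
-- B: count zeros/ones, derive which bit-class to keep, then one filtering pass.
def partitionPass_alt (data : List String) (pos : Int) (keepMost : Bool) : List String :=
  let c := data.foldl (fun (c : Int × Int) s =>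
      if s.toList.length ≠ 0 then
        if PySem.Str.pyGet? s pos == some '0' then (c.1 + 1, c.2) else (c.1, c.2 + 1)
      else c) (0, 0)
  let keepZeros := (decide (c.1 > c.2)) == keepMost
  data.filter (fun s => (s.toList.length != 0) && ((PySem.Str.pyGet? s pos == some '0') == keepZeros))

-- ===== PRECONDITION & SPEC =====
-- Pre_: Python A evaluates s[pos] on every non-empty string, so pos must be a valid Python index into each non-empty string (else IndexError).
def Pre_partitionPass (data : List String) (pos : Int) (keepMost : Bool) : Prop :=
  ∀ s ∈ data, s.toList.length ≠ 0 → PySem.Raise.InRange s.toList.length pos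
instance (data : List String) (pos : Int) (keepMost : Bool) : Decidable (Pre_partitionPass data pos keepMost) := by unfold Pre_partitionPass; infer_instance

def pvWitness_partitionPass : List String × Int × Bool := (["010", "110", "", "001"], 1, true)

def Spec_partitionPass (data : List String) (pos : Int) (keepMost : Bool) (out : List String) : Prop := out = partitionPass_alt data pos keepMost
instance (data : List String) (pos : Int) (keepMost : Bool) (out : List String) : Decidable (Spec_partitionPass data pos keepMost out) := by unfold Spec_partitionPass; infer_instance

-- ===== CLAIM (what is proved, stated in full; the proofs are below) =====
def Claim_equal_partitionPass : Prop := ∀ (data : List String) (pos : Int) (keepMost : Bool), Dom_partitionPass data pos keepMost → Pre_partitionPass data pos keepMost → Spec_partitionPass data pos keepMost (partitionPass data pos keepMost)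

-- ===== LEMMAS AND PROOFS =====

def pvF0 (pos : Int) (s : String) : Bool := (s.toList.length != 0) && (PySem.Str.pyGet? s pos == some '0')
def pvF1 (pos : Int) (s : String) : Bool := (s.toList.length != 0) && !(PySem.Str.pyGet? s pos == some '0')

theorem pvFoldA (pos : Int) (data : List String) (z o : List String) :
    data.foldl (fun (acc : List String × List String) s =>
      if s.toList.length = 0 then acc
      else if PySem.Str.pyGet? s pos == some '0' then (acc.1 ++ [s], acc.2)
      else (acc.1, acc.2 ++ [s])) (z, o)
    = (z ++ data.filter (pvF0 pos), o ++ data.filter (pvF1 pos)) := by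
  induction data generalizing z o with
  | nil => simp
  | cons s t ih =>
    rw [List.foldl_cons]
    by_cases h0 : s.toList.length = 0
    · rw [if_pos h0, ih]
      have hf0 : pvF0 pos s = false := by simp [pvF0, h0]
      have hf1 : pvF1 pos s = false := by simp [pvF1, h0]
      rw [List.filter_cons, List.filter_cons, hf0, hf1]
      simp
    · rw [if_neg h0]
      by_cases h1 : (PySem.Str.pyGet? s pos == some '0') = true
      all_goals have hs : ¬ s = "" := fun e => h0 (by simp [e])
      · rw [if_pos h1, ih]
        have hg : PySem.List.pyGet? s.toList pos = some '0' := by simpa using h1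
        have hf0 : pvF0 pos s = true := by simp [pvF0]; tauto
        have hf1 : pvF1 pos s = false := by simp [pvF1]; tauto
        rw [List.filter_cons, List.filter_cons, hf0, hf1]
        simp
      · rw [if_neg h1, ih]
        have hg : ¬ PySem.List.pyGet? s.toList pos = some '0' := by simpa using h1
        have hf0 : pvF0 pos s = false := by simp [pvF0]; tauto
        have hf1 : pvF1 pos s = true := by simp [pvF1]; tauto
        rw [List.filter_cons, List.filter_cons, hf0, hf1]
        simp

theorem pvFoldB (pos : Int) (data : List String) (cz co : Int) :
    data.foldl (fun (c : Int × Int) s =>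
      if s.toList.length ≠ 0 then
        if PySem.Str.pyGet? s pos == some '0' then (c.1 + 1, c.2) else (c.1, c.2 + 1)
      else c) (cz, co)
    = (cz + ((data.filter (pvF0 pos)).length : Int), co + ((data.filter (pvF1 pos)).length : Int)) := by
  induction data generalizing cz co with
  | nil => simp
  | cons s t ih =>
    rw [List.foldl_cons]
    by_cases h0 : s.toList.length = 0
    · rw [if_neg (by simpa using h0), ih]
      have hf0 : pvF0 pos s = false := by simp [pvF0, h0]
      have hf1 : pvF1 pos s = false := by simp [pvF1, h0]
      rw [List.filter_cons, List.filter_cons, hf0, hf1]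
      simp
    · rw [if_pos h0]
      by_cases h1 : (PySem.Str.pyGet? s pos == some '0') = true
      all_goals have hs : ¬ s = "" := fun e => h0 (by simp [e])
      · rw [if_pos h1, ih]
        have hg : PySem.List.pyGet? s.toList pos = some '0' := by simpa using h1
        have hf0 : pvF0 pos s = true := by simp [pvF0]; tauto
        have hf1 : pvF1 pos s = false := by simp [pvF1]; tauto
        rw [List.filter_cons, List.filter_cons, hf0, hf1]
        rw [Prod.ext_iff]
        constructor <;> simp <;> push_cast <;> ring
      · rw [if_neg h1, ih]
        have hg : ¬ PySem.List.pyGet? s.toList pos = some '0' := by simpa using h1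
        have hf0 : pvF0 pos s = false := by simp [pvF0]; tauto
        have hf1 : pvF1 pos s = true := by simp [pvF1]; tauto
        rw [List.filter_cons, List.filter_cons, hf0, hf1]
        rw [Prod.ext_iff]
        constructor <;> simp <;> push_cast <;> ring

-- ===== VERDICT (by name: the statement is the Claim_ definition above) =====
theorem partitionPass_spec : Claim_equal_partitionPass := by
  intro data pos keepMost _ _
  unfold Spec_partitionPass partitionPass partitionPass_alt
  rw [pvFoldA, pvFoldB]
  simp only [List.nil_append, zero_add]
  have hdec : (decide (((data.filter (pvF0 pos)).length : Int) > ((data.filter (pvF1 pos)).length : Int)))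
      = decide ((data.filter (pvF0 pos)).length > (data.filter (pvF1 pos)).length) := by simp
  by_cases h : (data.filter (pvF0 pos)).length > (data.filter (pvF1 pos)).length <;>
    cases keepMost <;>
      simp only [hdec, h, decide_true, decide_false, beq_self_eq_true,
        if_true, if_false, gt_iff_lt] <;>
    · apply Eq.symm
      apply List.filter_congr
      intro s _
      simp [pvF0, pvF1]
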